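-- pv_equiv track=rewrite | github.com/Asher012/feedback-forge | app.py | _explain_topic
-- ===== SOURCE A (Python) =====
-- def _explain_topic(keywords):
--     """Provide explanation for discovered topics"""
--     explanations = {
--         ('performance', 'speed', 'fast', 'slow'): "Performance and Speed Issues",
--         ('design', 'interface', 'ui', 'look'): "User Interface and Design",
--         ('bug', 'crash', 'error', 'problem'): "Technical Issues and Bugs",
--         ('feature', 'function', 'work'): "App Functionality",
--         ('easy', 'difficult', 'simple'): "User Experience and Usability"
--     }
--
--     keywords_lower = [k.lower() for k in keywords]
--
--     for key_terms, explanation in explanations.items():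
--         if any(term in keywords_lower for term in key_terms):
--             return explanation
--
--     return f"Topic focused on: {', '.join(keywords[:3])}"
-- ===== SOURCE B (Python) =====
-- _RANK_EXPLANATIONS = [
--     "Performance and Speed Issues",
--     "User Interface and Design",
--     "Technical Issues and Bugs",
--     "App Functionality",
--     "User Experience and Usability",
-- ]
--
-- _TERM_RANK = {
--     'performance': 0, 'speed': 0, 'fast': 0, 'slow': 0,
--     'design': 1, 'interface': 1, 'ui': 1, 'look': 1,
--     'bug': 2, 'crash': 2, 'error': 2, 'problem': 2,
--     'feature': 3, 'function': 3, 'work': 3,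
--     'easy': 4, 'difficult': 4, 'simple': 4,
-- }
--
--
-- def _explain_topic(keywords):
--     """Provide explanation for discovered topics"""
--     best = None
--     for k in keywords:
--         r = _TERM_RANK.get(k.lower())
--         if r is not None and (best is None or r < best):
--             best = r
--     if best is not None:
--         return _RANK_EXPLANATIONS[best]
--     return f"Topic focused on: {', '.join(keywords[:3])}"
-- ===== Notes on version B (the rewrite author's own statement) =====
-- stated objective: faster
-- what changed: Instead of building a lowered copy of the keyword list and rescanning it once per topic, B precomputes an inverted term->priority-rank index and makes a single pass over the keywords keeping the minimum matched rank, returning that rank's explanation (same fallback on the original keywords).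
import Mathlib
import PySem

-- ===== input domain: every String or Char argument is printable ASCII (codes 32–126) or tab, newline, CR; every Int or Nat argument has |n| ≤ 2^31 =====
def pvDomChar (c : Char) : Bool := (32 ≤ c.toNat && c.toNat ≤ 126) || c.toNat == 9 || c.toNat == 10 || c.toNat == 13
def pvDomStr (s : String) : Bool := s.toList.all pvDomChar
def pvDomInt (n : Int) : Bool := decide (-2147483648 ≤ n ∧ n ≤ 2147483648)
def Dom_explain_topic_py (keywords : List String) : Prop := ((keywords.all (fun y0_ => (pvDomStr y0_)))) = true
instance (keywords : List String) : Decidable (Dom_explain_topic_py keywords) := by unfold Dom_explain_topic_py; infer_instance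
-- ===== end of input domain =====

-- B replaces A's rescan of the lowered keyword list once per topic by an inverted
-- term→rank index consulted in a single pass over the keywords (alternative decomposition).

-- ===== PORT A =====
-- the 'explanations' dict literal of A (tuple keys → term lists, in insertion order)
def pvExplanations : List (List String × String) :=
  [ (["performance", "speed", "fast", "slow"], "Performance and Speed Issues"),
    (["design", "interface", "ui", "look"], "User Interface and Design"),
    (["bug", "crash", "error", "problem"], "Technical Issues and Bugs"),
    (["feature", "function", "work"], "App Functionality"),
    (["easy", "difficult", "simple"], "User Experience and Usability") ]

-- the 'for key_terms, explanation in explanations.items()' loop with its early return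
def pvScanA (kl : List String) : List (List String × String) → Option String
  | [] => none
  | (terms, expl) :: rest =>
      if terms.any (fun term => kl.contains term) then some expl else pvScanA kl rest

def explain_topic_py (keywords : List String) : String :=
  let keywords_lower := keywords.map PySem.Str.lower
  match pvScanA keywords_lower pvExplanations with
  | some expl => expl
  | none => "Topic focused on: " ++ PySem.Str.join ", " (PySem.List.slice keywords none (some 3))

-- ===== PORT B =====
def pvRankExplanations : List String :=
  [ "Performance and Speed Issues",
    "User Interface and Design",
    "Technical Issues and Bugs",
    "App Functionality",
    "User Experience and Usability" ]

def pvTermRank : PySem.Dict String Nat :=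
  PySem.Dict.ofList
    [ ("performance", 0), ("speed", 0), ("fast", 0), ("slow", 0),
      ("design", 1), ("interface", 1), ("ui", 1), ("look", 1),
      ("bug", 2), ("crash", 2), ("error", 2), ("problem", 2),
      ("feature", 3), ("function", 3), ("work", 3),
      ("easy", 4), ("difficult", 4), ("simple", 4) ]

-- body of B's 'for k in keywords' loop: keep the least matched rank
def pvStepB (best : Option Nat) (k : String) : Option Nat :=
  match pvTermRank.get? (PySem.Str.lower k) with
  | none => best
  | some r =>
    match best with
    | none => some r
    | some b => if r < b then some r else some b

def explain_topic_py_alt (keywords : List String) : String :=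
  match keywords.foldl pvStepB none with
  | some best => pvRankExplanations.getD best ""
  | none => "Topic focused on: " ++ PySem.Str.join ", " (PySem.List.slice keywords none (some 3))

-- ===== PRECONDITION & SPEC =====
def Spec_explain_topic_py (keywords : List String) (out : String) : Prop := out = explain_topic_py_alt keywords
instance (keywords : List String) (out : String) : Decidable (Spec_explain_topic_py keywords out) := by unfold Spec_explain_topic_py; infer_instance

-- ===== CLAIM (what is proved, stated in full; the proofs are below) =====
def Claim_equal_explain_topic_py : Prop := ∀ (keywords : List String), Dom_explain_topic_py keywords → Spec_explain_topic_py keywords (explain_topic_py keywords)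

-- ===== LEMMAS AND PROOFS =====

-- proof-side view of A's five term lists
def pvTerms : Nat → List String
  | 0 => ["performance", "speed", "fast", "slow"]
  | 1 => ["design", "interface", "ui", "look"]
  | 2 => ["bug", "crash", "error", "problem"]
  | 3 => ["feature", "function", "work"]
  | 4 => ["easy", "difficult", "simple"]
  | _ => []

theorem pvTermRank_eq : pvTermRank = PySem.Dict.mk
    [ ("performance", 0), ("speed", 0), ("fast", 0), ("slow", 0),
      ("design", 1), ("interface", 1), ("ui", 1), ("look", 1),
      ("bug", 2), ("crash", 2), ("error", 2), ("problem", 2),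
      ("feature", 3), ("function", 3), ("work", 3),
      ("easy", 4), ("difficult", 4), ("simple", 4) ] := by decide

theorem pvGet?_mem {l : List (String × Nat)} {s : String} {r : Nat}
    (h : (PySem.Dict.mk l).get? s = some r) : (s, r) ∈ l := by
  induction l with
  | nil => simp [PySem.Dict.get?] at h
  | cons p l ih =>
    obtain ⟨k, v⟩ := p
    rw [PySem.Dict.get?_mk_cons] at h
    by_cases hk : (k == s) = true
    · rw [if_pos hk] at h
      injection h with h
      subst h
      rw [eq_of_beq hk]
      exact List.mem_cons_self
    · rw [if_neg hk] at h
      exact List.mem_cons_of_mem _ (ih h)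

theorem pvRank_some (s : String) (r : Nat) (h : pvTermRank.get? s = some r) :
    r < 5 ∧ s ∈ pvTerms r := by
  have hmem := pvGet?_mem (pvTermRank_eq ▸ h)
  fin_cases hmem <;> decide

theorem pvRank_of_mem (i : Nat) (t : String) (ht : t ∈ pvTerms i) :
    pvTermRank.get? t = some i := by
  match i with
  | 0 | 1 | 2 | 3 | 4 =>
    simp only [pvTerms] at ht
    fin_cases ht <;> decide
  | n+5 => simp [pvTerms] at ht

-- A's branch condition for topic i
def pvCond (keywords : List String) (i : Nat) : Bool :=
  (pvTerms i).any (fun term => (keywords.map PySem.Str.lower).contains term)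

theorem pvCond_iff (keywords : List String) (i : Nat) :
    pvCond keywords i = true ↔
      ∃ k ∈ keywords, pvTermRank.get? (PySem.Str.lower k) = some i := by
  constructor
  · intro h
    rcases List.any_eq_true.mp h with ⟨t, ht, htkl⟩
    rcases List.mem_map.mp (List.contains_iff_mem.mp htkl) with ⟨k, hk, hlk⟩
    exact ⟨k, hk, by rw [hlk]; exact pvRank_of_mem i t ht⟩
  · rintro ⟨k, hk, hr⟩
    rcases pvRank_some _ _ hr with ⟨_, hmem⟩
    exact List.any_eq_true.mpr
      ⟨PySem.Str.lower k, hmem, List.contains_iff_mem.mpr (List.mem_map.mpr ⟨k, hk, rfl⟩)⟩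

-- A's scan over the literal dict is the five-way branch on the pvCond's
theorem pvScanA_eq (kl : List String) :
    pvScanA kl pvExplanations =
      if (pvTerms 0).any (fun t => kl.contains t) then some "Performance and Speed Issues"
      else if (pvTerms 1).any (fun t => kl.contains t) then some "User Interface and Design"
      else if (pvTerms 2).any (fun t => kl.contains t) then some "Technical Issues and Bugs"
      else if (pvTerms 3).any (fun t => kl.contains t) then some "App Functionality"
      else if (pvTerms 4).any (fun t => kl.contains t) then some "User Experience and Usability"
      else none := by
  simp [pvScanA, pvExplanations, pvTerms]

-- characterisation of B's fold when it yields no rank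
theorem pvBest_none (ks : List String) (acc : Option Nat)
    (h : ks.foldl pvStepB acc = none) :
    acc = none ∧ ∀ k ∈ ks, pvTermRank.get? (PySem.Str.lower k) = none := by
  induction ks generalizing acc with
  | nil => exact ⟨h, by simp⟩
  | cons k ks ih =>
    rw [List.foldl_cons] at h
    rcases ih (pvStepB acc k) h with ⟨hstep, hrest⟩
    rcases hget : pvTermRank.get? (PySem.Str.lower k) with _ | r
    · have hacc : acc = none := by unfold pvStepB at hstep; rw [hget] at hstep; exact hstep
      refine ⟨hacc, ?_⟩
      intro x hx
      rcases List.mem_cons.mp hx with rfl | hx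
      · exact hget
      · exact hrest x hx
    · exfalso
      simp only [pvStepB, hget] at hstep
      cases acc with
      | none => cases hstep
      | some b =>
        dsimp only at hstep
        by_cases hlt : r < b
        · rw [if_pos hlt] at hstep; cases hstep
        · rw [if_neg hlt] at hstep; cases hstep

-- characterisation of B's fold when it yields a rank: r occurs and is minimal
theorem pvBest_some (ks : List String) (acc : Option Nat) (r : Nat)
    (h : ks.foldl pvStepB acc = some r) :
    (acc = some r ∨ ∃ k ∈ ks, pvTermRank.get? (PySem.Str.lower k) = some r) ∧
    (∀ b, acc = some b → r ≤ b) ∧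
    (∀ k ∈ ks, ∀ j, pvTermRank.get? (PySem.Str.lower k) = some j → r ≤ j) := by
  induction ks generalizing acc with
  | nil =>
    simp only [List.foldl_nil] at h
    subst h
    exact ⟨Or.inl rfl, fun b hb => le_of_eq (Option.some.inj hb), by simp⟩
  | cons k ks ih =>
    rw [List.foldl_cons] at h
    rcases ih (pvStepB acc k) h with ⟨hocc, haccb, hmin⟩
    rcases hget : pvTermRank.get? (PySem.Str.lower k) with _ | rk
    · have hstep : pvStepB acc k = acc := by simp only [pvStepB, hget]
      rw [hstep] at hocc haccb
      refine ⟨?_, haccb, ?_⟩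
      · rcases hocc with h1 | ⟨x, hx, hxr⟩
        · exact Or.inl h1
        · exact Or.inr ⟨x, List.mem_cons_of_mem _ hx, hxr⟩
      · intro x hx j hj
        rcases List.mem_cons.mp hx with rfl | hx
        · rw [hget] at hj; cases hj
        · exact hmin x hx j hj
    · have hstep : pvStepB acc k =
          match acc with
          | none => some rk
          | some b => if rk < b then some rk else some b := by
        cases acc <;> simp only [pvStepB, hget]
      have hrle : r ≤ rk ∧ (∀ b, acc = some b → r ≤ b) := by
        cases acc with
        | none =>
          have := haccb rk (by rw [hstep])
          exact ⟨this, by simp⟩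
        | some b =>
          by_cases hlt : rk < b
          · have := haccb rk (by rw [hstep]; simp [hlt])
            exact ⟨this, fun b' hb' => by cases hb'; omega⟩
          · have := haccb b (by rw [hstep]; simp [hlt])
            exact ⟨by omega, fun b' hb' => by cases hb'; omega⟩
      refine ⟨?_, hrle.2, ?_⟩
      · rcases hocc with h1 | ⟨x, hx, hxr⟩
        · cases acc with
          | none =>
            rw [hstep] at h1
            exact Or.inr ⟨k, List.mem_cons_self, by rw [hget, Option.some.inj h1]⟩
          | some b =>
            rw [hstep] at h1
            by_cases hlt : rk < b
            · simp only [if_pos hlt] at h1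
              exact Or.inr ⟨k, List.mem_cons_self, by rw [hget, Option.some.inj h1]⟩
            · simp only [if_neg hlt] at h1
              exact Or.inl (by rw [h1])
        · exact Or.inr ⟨x, List.mem_cons_of_mem _ hx, hxr⟩
      · intro x hx j hj
        rcases List.mem_cons.mp hx with rfl | hx
        · rw [hget] at hj
          injection hj with hj
          subst hj
          exact hrle.1
        · exact hmin x hx j hj

-- ===== VERDICT (by name: the statement is the Claim_ definition above) =====
theorem explain_topic_py_spec : Claim_equal_explain_topic_py := by
  intro keywords _
  unfold Spec_explain_topic_py
  have hA : explain_topic_py keywords =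
      (match pvScanA (keywords.map PySem.Str.lower) pvExplanations with
       | some expl => expl
       | none => "Topic focused on: " ++ PySem.Str.join ", " (PySem.List.slice keywords none (some 3))) := rfl
  rcases hbest : keywords.foldl pvStepB none with _ | r
  · -- no keyword matches any term: both take the fallback
    have hB : explain_topic_py_alt keywords =
        "Topic focused on: " ++ PySem.Str.join ", " (PySem.List.slice keywords none (some 3)) := by
      unfold explain_topic_py_alt; rw [hbest]
    have hnone := (pvBest_none keywords none hbest).2
    have hcond : ∀ i, pvCond keywords i = false := by
      intro i
      rcases hc : pvCond keywords i with _ | _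
      · rfl
      · rcases (pvCond_iff keywords i).mp hc with ⟨k, hk, hr⟩
        rw [hnone k hk] at hr; cases hr
    have h0 := hcond 0; have h1 := hcond 1; have h2 := hcond 2
    have h3 := hcond 3; have h4 := hcond 4
    unfold pvCond at h0 h1 h2 h3 h4
    rw [hA, hB, pvScanA_eq, h0, h1, h2, h3, h4]
    rfl
  · -- the minimum matched rank r: A's scan stops exactly at topic r
    have hB : explain_topic_py_alt keywords = pvRankExplanations.getD r "" := by
      unfold explain_topic_py_alt; rw [hbest]
    rcases pvBest_some keywords none r hbest with ⟨hocc, _, hmin⟩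
    rcases hocc with h1 | ⟨k, hk, hkr⟩
    · cases h1
    have hr5 : r < 5 := (pvRank_some _ _ hkr).1
    have hcr : pvCond keywords r = true :=
      (pvCond_iff keywords r).mpr ⟨k, hk, hkr⟩
    have hlow : ∀ i, i < r → pvCond keywords i = false := by
      intro i hi
      rcases hc : pvCond keywords i with _ | _
      · rfl
      · rcases (pvCond_iff keywords i).mp hc with ⟨k', hk', hr'⟩
        have := hmin k' hk' i hr'
        omega
    rw [hA, hB, pvScanA_eq]
    unfold pvCond at hcr hlow
    interval_cases r
    · rw [hcr]; rfl
    · rw [hlow 0 (by omega), hcr]; rfl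
    · rw [hlow 0 (by omega), hlow 1 (by omega), hcr]; rfl
    · rw [hlow 0 (by omega), hlow 1 (by omega), hlow 2 (by omega), hcr]; rfl
    · rw [hlow 0 (by omega), hlow 1 (by omega), hlow 2 (by omega), hlow 3 (by omega), hcr]; rfl
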